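-- pv_equiv track=rewrite | github.com/faheem-s27/Pac_Man_Synoptic_Project | Code/Maze/MazeGenerator.py | _find_bridgeable_wall_segment_on_row
-- ===== SOURCE A (Python) =====
-- def _is_open_tile(v):
--     return v in (0, 2)
--
-- def _find_bridgeable_wall_segment_on_row(maze, component, y, min_len=4):
--     row_x = sorted(x for (x, ry) in component if ry == y)
--     if not row_x:
--         return None
--
--     segments = []
--     start = row_x[0]
--     prev = row_x[0]
--     for x in row_x[1:]:
--         if x == prev + 1:
--             prev = x
--             continue
--         segments.append((start, prev))
--         start = x
--         prev = x
--     segments.append((start, prev))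
--
--     candidates = []
--     for sx, ex in segments:
--         if (ex - sx + 1) < min_len:
--             continue
--         if not _is_open_tile(maze[y][sx - 1]):
--             continue
--         if not _is_open_tile(maze[y][ex + 1]):
--             continue
--         candidates.append((sx, ex))
--
--     if not candidates:
--         return None
--     return max(candidates, key=lambda p: p[1] - p[0])
-- ===== SOURCE B (Python) =====
-- def _is_open_tile(v):
--     return v in (0, 2)
--
-- def _find_bridgeable_wall_segment_on_row(maze, component, y, min_len=4):
--     S = {x for (x, ry) in component if ry == y}
--     if not S:
--         return None
--     best = None
--     for x in sorted(S):
--         if x - 1 in S: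
--             continue
--         ex = x
--         while ex + 1 in S:
--             ex += 1
--         if ex - x + 1 < min_len:
--             continue
--         if not _is_open_tile(maze[y][x - 1]) or not _is_open_tile(maze[y][ex + 1]):
--             continue
--         if best is None or ex - x > best[1] - best[0]:
--             best = (x, ex)
--     return best
-- ===== Notes on version B (the rewrite author's own statement) =====
-- stated objective: alternative
-- what changed: Replaces the sorted prev-scan that builds an explicit segment list, then filters it and takes max(), with a set-based pass: run starts are found by membership (x-1 not in S), each run is extended forward by membership, and the best candidate is tracked online with strict improvement (same first-maximal, smallest-sx result); Pre_ excludes components with a duplicated x on row y (A's prev-scan splits a run at the duplicate, an artefact of its implementation) and inputs where A raises IndexError on a neighbour lookup.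
import Mathlib
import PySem

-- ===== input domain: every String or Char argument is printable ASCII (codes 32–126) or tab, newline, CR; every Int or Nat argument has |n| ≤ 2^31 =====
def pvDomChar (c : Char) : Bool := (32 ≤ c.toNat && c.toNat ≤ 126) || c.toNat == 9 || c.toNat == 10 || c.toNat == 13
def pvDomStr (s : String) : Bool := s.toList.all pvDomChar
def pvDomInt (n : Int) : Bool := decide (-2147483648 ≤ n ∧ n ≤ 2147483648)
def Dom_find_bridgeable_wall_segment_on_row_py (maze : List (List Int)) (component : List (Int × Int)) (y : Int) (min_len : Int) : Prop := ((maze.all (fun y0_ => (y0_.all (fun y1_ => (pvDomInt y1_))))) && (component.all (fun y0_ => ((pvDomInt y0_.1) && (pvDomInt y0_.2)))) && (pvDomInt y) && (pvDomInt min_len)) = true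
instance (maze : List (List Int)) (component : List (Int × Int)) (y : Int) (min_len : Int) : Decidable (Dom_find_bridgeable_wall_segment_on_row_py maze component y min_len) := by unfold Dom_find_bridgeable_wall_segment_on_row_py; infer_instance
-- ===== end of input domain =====

-- B replaces A's sorted prev-scan (build segment list, filter, max()) by a set-based pass: run starts
-- by membership, runs extended by membership, best candidate tracked online (alternative structure).

-- ===== PORT A =====
-- _is_open_tile (module helper shared by both implementations)
def pyIsOpen (v : Int) : Bool := v == 0 || v == 2

-- the x-coordinates of component members on row y, in component order (before A sorts them)
def rowList (component : List (Int × Int)) (y : Int) : List Int :=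
  (component.filter (fun p => p.2 == y)).map (fun p => p.1)

-- maze[y][i]; the junk value 1 (a wall, not open) stands in where Python raises IndexError — Pre_ excludes those inputs
def tileAt (maze : List (List Int)) (y i : Int) : Int :=
  ((PySem.List.pyGet? maze y).bind (fun row => PySem.List.pyGet? row i)).getD 1

-- A's 'for x in row_x[1:]' loop building the segment list
def segLoop : List Int → List (Int × Int) → Int → Int → List (Int × Int)
  | [], segs, start, prev => segs ++ [(start, prev)]
  | x :: rest, segs, start, prev =>
    if x == prev + 1 then segLoop rest segs start x
    else segLoop rest (segs ++ [(start, prev)]) x x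

-- the three 'continue' tests of A's candidate loop, in evaluation order
def okSeg (maze : List (List Int)) (y min_len : Int) (p : Int × Int) : Bool :=
  decide (min_len ≤ p.2 - p.1 + 1) && pyIsOpen (tileAt maze y (p.1 - 1)) && pyIsOpen (tileAt maze y (p.2 + 1))

def find_bridgeable_wall_segment_on_row_py (maze : List (List Int)) (component : List (Int × Int)) (y : Int) (min_len : Int) : Option (Int × Int) :=
  match PySem.List.sorted (rowList component y) (fun x => x) false with
  | [] => none
  | h :: t =>
    PySem.List.max? ((segLoop t [] h h).filter (okSeg maze y min_len)) (fun p => p.2 - p.1)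

-- ===== PORT B =====
-- Source B's 'while ex + 1 in S: ex += 1'; fuel |S| makes it structural (a run holds ≤ |S| distinct ints)
def bExtend (S : List Int) : Nat → Int → Int
  | 0, ex => ex
  | n + 1, ex => if S.contains (ex + 1) then bExtend S n (ex + 1) else ex

-- Source B's 'for x in sorted(S)' loop with online best tracking
def bLoop (maze : List (List Int)) (S : List Int) (y min_len : Int) :
    List Int → Option (Int × Int) → Option (Int × Int)
  | [], best => best
  | x :: rest, best =>
    if S.contains (x - 1) then bLoop maze S y min_len rest best
    else
      let ex := bExtend S S.length x
      if ex - x + 1 < min_len then bLoop maze S y min_len rest best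
      else if !(pyIsOpen (tileAt maze y (x - 1))) || !(pyIsOpen (tileAt maze y (ex + 1))) then
        bLoop maze S y min_len rest best
      else
        match best with
        | none => bLoop maze S y min_len rest (some (x, ex))
        | some b =>
          if b.2 - b.1 < ex - x then bLoop maze S y min_len rest (some (x, ex))
          else bLoop maze S y min_len rest best

def find_bridgeable_wall_segment_on_row_py_alt (maze : List (List Int)) (component : List (Int × Int)) (y : Int) (min_len : Int) : Option (Int × Int) :=
  let S : PySem.Set Int := PySem.Set.ofList (rowList component y)
  if S.isEmpty then none
  else bLoop maze S y min_len (PySem.List.sorted S (fun x => x) false) none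

-- ===== PRECONDITION & SPEC =====
-- Pre_ excludes (a) components with a duplicated x-coordinate on row y, where A's prev-scan splits a
-- run at the duplicate (an accidental artefact of its implementation), and (b) inputs where A raises
-- IndexError on a neighbour lookup maze[y][sx-1] / maze[y][ex+1] of a long-enough wall run.
def Pre_find_bridgeable_wall_segment_on_row_py (maze : List (List Int)) (component : List (Int × Int)) (y : Int) (min_len : Int) : Prop :=
  (rowList component y).Nodup ∧
  ¬ ∃ sx ∈ rowList component y, ∃ ex ∈ rowList component y,
      sx ≤ ex ∧ (sx - 1) ∉ rowList component y ∧ (ex + 1) ∉ rowList component y ∧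
      (∀ i ∈ PySem.List.pyRange sx (ex + 1) 1, i ∈ rowList component y) ∧
      min_len ≤ ex - sx + 1 ∧
      (¬ PySem.Raise.InRange maze.length y ∨
        ∀ row ∈ PySem.List.pyGet? maze y,
          ¬ PySem.Raise.InRange row.length (sx - 1) ∨
            (pyIsOpen ((PySem.List.pyGet? row (sx - 1)).getD 1) = true ∧
             ¬ PySem.Raise.InRange row.length (ex + 1)))
instance (maze : List (List Int)) (component : List (Int × Int)) (y : Int) (min_len : Int) : Decidable (Pre_find_bridgeable_wall_segment_on_row_py maze component y min_len) := by unfold Pre_find_bridgeable_wall_segment_on_row_py; infer_instance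

def pvWitness_find_bridgeable_wall_segment_on_row_py : List (List Int) × (List (Int × Int)) × Int × Int :=
  ([[0, 1, 1, 1, 1, 0]], [(1, 0), (2, 0), (3, 0), (4, 0)], 0, 4)

def Spec_find_bridgeable_wall_segment_on_row_py (maze : List (List Int)) (component : List (Int × Int)) (y : Int) (min_len : Int) (out : Option (Int × Int)) : Prop := out = find_bridgeable_wall_segment_on_row_py_alt maze component y min_len
instance (maze : List (List Int)) (component : List (Int × Int)) (y : Int) (min_len : Int) (out : Option (Int × Int)) : Decidable (Spec_find_bridgeable_wall_segment_on_row_py maze component y min_len out) := by unfold Spec_find_bridgeable_wall_segment_on_row_py; infer_instance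

-- ===== CLAIM (what is proved, stated in full; the proofs are below) =====
def Claim_equal_find_bridgeable_wall_segment_on_row_py : Prop := ∀ (maze : List (List Int)) (component : List (Int × Int)) (y : Int) (min_len : Int), Dom_find_bridgeable_wall_segment_on_row_py maze component y min_len → Pre_find_bridgeable_wall_segment_on_row_py maze component y min_len → Spec_find_bridgeable_wall_segment_on_row_py maze component y min_len (find_bridgeable_wall_segment_on_row_py maze component y min_len)

-- ===== LEMMAS AND PROOFS =====

-- the first-maximal update step (what Python's max(.., key=len) folds, and what B's loop maintains)
def updBest (best : Option (Int × Int)) (r : Int × Int) : Option (Int × Int) :=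
  match best with
  | none => some r
  | some b => if b.2 - b.1 < r.2 - r.1 then some r else some b

lemma max?_eq_foldl_updBest (cs : List (Int × Int)) :
    PySem.List.max? cs (fun p => p.2 - p.1) = cs.foldl updBest none := by
  unfold PySem.List.max?
  congr 1
  funext acc r
  cases acc <;> simp [updBest]

-- pure description of A's run decomposition
def runEnd : Int → List Int → Int
  | p, [] => p
  | p, x :: rest => if x = p + 1 then runEnd x rest else p

def runsFrom : Int → Int → List Int → List (Int × Int)
  | s, p, [] => [(s, p)]
  | s, p, x :: rest => if x = p + 1 then runsFrom s x rest else (s, p) :: runsFrom x x rest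

def runsTail : Int → List Int → List (Int × Int)
  | _, [] => []
  | p, x :: rest => if x = p + 1 then runsTail x rest else runsFrom x x rest

lemma segLoop_eq (t : List Int) : ∀ (segs : List (Int × Int)) (s p : Int),
    segLoop t segs s p = segs ++ runsFrom s p t := by
  induction t with
  | nil => intro segs s p; simp [segLoop, runsFrom]
  | cons x rest ih =>
    intro segs s p
    by_cases hx : x = p + 1 <;>
      simp [segLoop, runsFrom, hx, ih]

lemma runsFrom_cons (t : List Int) : ∀ (s p : Int),
    runsFrom s p t = (s, runEnd p t) :: runsTail p t := by
  induction t with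
  | nil => intro s p; simp [runsFrom, runEnd, runsTail]
  | cons x rest ih =>
    intro s p
    by_cases hx : x = p + 1 <;> simp [runsFrom, runEnd, runsTail, hx, ih]

lemma runEnd_ge (t : List Int) : ∀ p : Int, p ≤ runEnd p t := by
  induction t with
  | nil => intro p; simp [runEnd]
  | cons x rest ih =>
    intro p
    by_cases hx : x = p + 1 <;> simp [runEnd, hx]
    exact le_trans (by omega) (hx ▸ ih x)

lemma runEnd_between (t : List Int) : ∀ (p i : Int), p < i → i ≤ runEnd p t → i ∈ t := by
  induction t with
  | nil => intro p i h1 h2; simp [runEnd] at h2; omega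
  | cons x rest ih =>
    intro p i h1 h2
    by_cases hx : x = p + 1
    · simp only [runEnd, if_pos hx] at h2
      rcases (by omega : x < i ∨ i ≤ x) with h | h
      · exact List.mem_cons_of_mem _ (ih x i h h2)
      · have : i = x := by omega
        simp [this]
    · simp only [runEnd, if_neg hx] at h2; omega

lemma runEnd_succ_not_mem (t : List Int) : ∀ p : Int,
    List.Pairwise (· < ·) (p :: t) → runEnd p t + 1 ∉ t := by
  induction t with
  | nil => intro p _; simp
  | cons x rest ih =>
    intro p hp
    have hp' : List.Pairwise (· < ·) (x :: rest) := hp.of_cons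
    have hpx : p < x := (List.pairwise_cons.mp hp).1 x (by simp)
    by_cases hx : x = p + 1
    · simp only [runEnd, if_pos hx]
      intro hmem
      rcases List.mem_cons.mp hmem with h | h
      · have := runEnd_ge rest x; omega
      · exact ih x hp' h
    · simp only [runEnd, if_neg hx]
      intro hmem
      rcases List.mem_cons.mp hmem with h | h
      · exact hx h.symm
      · have := (List.pairwise_cons.mp hp').1 _ h
        omega

lemma bExtend_eq (S : List Int) : ∀ (fuel : Nat) (ex e : Int), ex ≤ e →
    (∀ i, ex < i → i ≤ e → i ∈ S) → (e + 1) ∉ S → (e - ex).toNat ≤ fuel →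
    bExtend S fuel ex = e := by
  intro fuel
  induction fuel with
  | zero =>
    intro ex e h1 _ _ h4
    have : e = ex := by omega
    simp [bExtend, this]
  | succ n ih =>
    intro ex e h1 h2 h3 h4
    rcases eq_or_lt_of_le h1 with he | he
    · subst he
      simp [bExtend, h3]
    · have hmem : (ex + 1) ∈ S := h2 (ex + 1) (by omega) (by omega)
      simp only [bExtend, List.contains_iff_mem, hmem, if_true]
      exact ih (ex + 1) e (by omega) (fun i hi1 hi2 => h2 i (by omega) hi2) h3 (by omega)

lemma interval_length (S : List Int) (a b : Int)
    (hsub : ∀ i, a ≤ i → i ≤ b → i ∈ S) (hnd : S.Nodup) : (b - a).toNat ≤ S.length := by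
  rcases (by omega : b < a ∨ a ≤ b) with h | h
  · omega
  · have hs : Finset.Icc a b ⊆ S.toFinset := by
      intro i hi
      rcases Finset.mem_Icc.mp hi with ⟨h1, h2⟩
      exact List.mem_toFinset.mpr (hsub i h1 h2)
    have hc := Finset.card_le_card hs
    rw [Int.card_Icc] at hc
    have hlen : S.toFinset.card = S.length := by
      rw [List.toFinset_card_of_nodup hnd]
    omega

-- one B-loop run-start step folds the okSeg test and the best update
lemma bLoop_eq_foldl (maze : List (List Int)) (S : List Int) (y m : Int) (hnd : S.Nodup) :
    ∀ (t : List Int) (s p : Int) (best : Option (Int × Int)),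
      List.Pairwise (· < ·) (p :: t) →
      (∀ z ∈ t, z ∈ S) →
      (∀ z ∈ S, z ≤ p ∨ z ∈ t) →
      (∀ i, s ≤ i → i ≤ p → i ∈ S) →
      s ≤ p →
      bLoop maze S y m t best
        = ((runsTail p t).filter (okSeg maze y m)).foldl updBest best := by
  intro t
  induction t with
  | nil => intro s p best _ _ _ _ _; simp [bLoop, runsTail]
  | cons x rest ih =>
    intro s p best hpair hsubS hcover hIcc hsp
    have hpair' : List.Pairwise (· < ·) (x :: rest) := hpair.of_cons
    have hpx : p < x := (List.pairwise_cons.mp hpair).1 x (by simp)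
    by_cases hx : x = p + 1
    · -- continuation of the current run: skipped by B (x-1 = p ∈ S)
      have hmem : (x - 1) ∈ S := by
        have : p ∈ S := hIcc p hsp le_rfl
        simpa [hx] using this
      simp only [bLoop, List.contains_iff_mem, hmem, if_true]
      rw [runsTail, if_pos hx]
      exact ih x x best hpair'
        (fun z hz => hsubS z (by simp [hz]))
        (fun z hz => by
          rcases hcover z hz with h | h
          · left; omega
          · rcases List.mem_cons.mp h with h | h
            · left; omega
            · right; exact h)
        (fun i h1 h2 => by
          have hix : i = x := le_antisymm h2 h1
          rw [hix]; exact hsubS x (by simp))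
        le_rfl
    · -- x starts a new run
      have hxge : p + 1 < x := by omega
      have hnot : (x - 1) ∉ S := by
        intro h
        rcases hcover _ h with h' | h'
        · omega
        · rcases List.mem_cons.mp h' with h' | h'
          · omega
          · have := (List.pairwise_cons.mp hpair').1 _ h'; omega
      have hxS : x ∈ S := hsubS x (by simp)
      -- the extension computes the run end
      obtain ⟨E, hE⟩ : ∃ E, runEnd x rest = E := ⟨_, rfl⟩
      have hEge : x ≤ E := hE ▸ runEnd_ge rest x
      have hbetween : ∀ i : Int, x < i → i ≤ E → i ∈ S := fun i h1 h2 =>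
        hsubS i (List.mem_cons_of_mem _ (runEnd_between rest x i h1 (by rw [hE]; exact h2)))
      have hext : bExtend S S.length x = E := by
        apply bExtend_eq S S.length x E hEge hbetween
        · intro h
          rcases hcover _ h with h' | h'
          · omega
          · rcases List.mem_cons.mp h' with h' | h'
            · omega
            · exact runEnd_succ_not_mem rest x hpair' (by rw [hE]; exact h')
        · exact interval_length S x E
            (fun i h1 h2 => by
              rcases eq_or_lt_of_le h1 with h | h
              · exact h ▸ hxS
              · exact hbetween i h h2)
            hnd
      have hstep : bLoop maze S y m (x :: rest) best
          = bLoop maze S y m rest (if okSeg maze y m (x, E) then updBest best (x, E) else best) := by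
        simp only [bLoop, List.contains_iff_mem, hnot, if_false, hext]
        by_cases h1 : E - x + 1 < m
        · have : okSeg maze y m (x, E) = false := by
            simp [okSeg]; omega
          simp [h1, this]
        · by_cases h2 : pyIsOpen (tileAt maze y (x - 1)) = true
          · by_cases h3 : pyIsOpen (tileAt maze y (E + 1)) = true
            · have hok : okSeg maze y m (x, E) = true := by
                simp [okSeg, h2, h3]; omega
              cases best with
              | none => simp [h1, h2, h3, hok, updBest]
              | some b =>
                by_cases h4 : b.2 - b.1 < E - x <;>
                  simp [h1, h2, h3, hok, updBest, h4]
            · have hok : okSeg maze y m (x, E) = false := by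
                simp [okSeg, h3]
              simp [h1, h2, h3, hok]
          · have hok : okSeg maze y m (x, E) = false := by
              simp [okSeg, h2]
            simp [h1, h2, hok]
      rw [hstep]
      rw [runsTail, if_neg hx, runsFrom_cons, hE]
      have := ih x x (if okSeg maze y m (x, E) then updBest best (x, E) else best)
        hpair' (fun z hz => hsubS z (by simp [hz]))
        (fun z hz => by
          rcases hcover z hz with h | h
          · left; omega
          · rcases List.mem_cons.mp h with h | h
            · left; omega
            · right; exact h)
        (fun i h1 h2 => by have hix : i = x := le_antisymm h2 h1; rw [hix]; exact hxS)
        le_rfl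
      rw [this]
      by_cases hok : okSeg maze y m (x, E) = true
      · simp [hok]
      · simp [hok]

-- ===== VERDICT (by name: the statement is the Claim_ definition above) =====
theorem find_bridgeable_wall_segment_on_row_py_spec : Claim_equal_find_bridgeable_wall_segment_on_row_py := by
  intro maze component y min_len _hdom hpre
  obtain ⟨hnd, -⟩ := hpre
  unfold Spec_find_bridgeable_wall_segment_on_row_py
  unfold find_bridgeable_wall_segment_on_row_py find_bridgeable_wall_segment_on_row_py_alt
  set xs := rowList component y with hxs
  set S : List Int := PySem.Set.ofList xs with hSdef
  have hndS : S.Nodup := by rw [hSdef]; exact PySem.Set.nodup_ofList xs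
  have hperm : S.Perm xs := by
    rw [List.perm_ext_iff_of_nodup hndS hnd]
    intro a
    rw [hSdef]
    exact PySem.Set.mem_ofList xs a
  have hsortEq : PySem.List.sorted xs (fun x => x) false = PySem.List.sorted S (fun x => x) false :=
    (PySem.List.sorted_eq_sorted_of_perm S xs (fun x => x) (fun _ _ hq => hq) hperm).symm
  rw [hsortEq]
  set l := PySem.List.sorted S (fun x => x) false with hl
  have hpl : List.Pairwise (· < ·) l := by
    rw [hl, hSdef]
    exact PySem.List.sorted_ofList_pairwise_lt xs
  cases hcase : l with
  | nil =>
    have hSnil : S = [] := (PySem.List.sorted_eq_nil_iff S (fun x => x) false).mp (hl.symm.trans hcase)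
    simp [hSnil]
  | cons h t =>
    have hmemS : ∀ z, z ∈ S ↔ z ∈ h :: t := by
      intro z
      rw [← hcase, hl]
      exact ⟨fun hzz => (PySem.List.mem_sorted S (fun x => x) false z).mpr hzz,
             fun hzz => (PySem.List.mem_sorted S (fun x => x) false z).mp hzz⟩
    have hpair' : List.Pairwise (· < ·) (h :: t) := hcase ▸ hpl
    have hhx : ∀ z ∈ t, h < z := (List.pairwise_cons.mp hpair').1
    have hsubS : ∀ z ∈ t, z ∈ S := fun z hz => (hmemS z).mpr (by simp [hz])
    have hhS : h ∈ S := (hmemS h).mpr (by simp)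
    have hnot : (h - 1) ∉ S := by
      intro hmem
      rcases List.mem_cons.mp ((hmemS _).mp hmem) with h' | h'
      · omega
      · have := hhx _ h'; omega
    obtain ⟨E, hE⟩ : ∃ E, runEnd h t = E := ⟨_, rfl⟩
    have hEge : h ≤ E := hE ▸ runEnd_ge t h
    have hbetween : ∀ i : Int, h < i → i ≤ E → i ∈ S := fun i h1 h2 =>
      hsubS i (runEnd_between t h i h1 (by rw [hE]; exact h2))
    have hext : bExtend S S.length h = E := by
      apply bExtend_eq S S.length h E hEge hbetween
      · intro hmem
        rcases List.mem_cons.mp ((hmemS _).mp hmem) with h' | h'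
        · omega
        · exact runEnd_succ_not_mem t h hpair' (by rw [hE]; exact h')
      · exact interval_length S h E
          (fun i h1 h2 => by
            rcases eq_or_lt_of_le h1 with h' | h'
            · exact h' ▸ hhS
            · exact hbetween i h' h2)
          hndS
    have hstep : bLoop maze S y min_len (h :: t) none
        = bLoop maze S y min_len t (if okSeg maze y min_len (h, E) then updBest none (h, E) else none) := by
      simp only [bLoop, List.contains_iff_mem, hnot, if_false, hext]
      by_cases h1 : E - h + 1 < min_len
      · have : okSeg maze y min_len (h, E) = false := by simp [okSeg]; omega
        simp [h1, this]
      · by_cases h2 : pyIsOpen (tileAt maze y (h - 1)) = true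
        · by_cases h3 : pyIsOpen (tileAt maze y (E + 1)) = true
          · have hok : okSeg maze y min_len (h, E) = true := by
              simp [okSeg, h2, h3]; omega
            simp [h1, h2, h3, hok, updBest]
          · have hok : okSeg maze y min_len (h, E) = false := by simp [okSeg, h3]
            simp [h1, h2, h3, hok]
        · have hok : okSeg maze y min_len (h, E) = false := by simp [okSeg, h2]
          simp [h1, h2, hok]
    have hloop := bLoop_eq_foldl maze S y min_len hndS t h h
      (if okSeg maze y min_len (h, E) then updBest none (h, E) else none)
      hpair' hsubS
      (fun z hz => by
        rcases List.mem_cons.mp ((hmemS z).mp hz) with h' | h'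
        · left; omega
        · right; exact h')
      (fun i h1 h2 => by have hih : i = h := le_antisymm h2 h1; rw [hih]; exact hhS)
      le_rfl
    have hSne : S.isEmpty = false := by
      have hne : S ≠ [] := by
        intro hS
        rw [hS] at hl
        have : l = [] := hl.trans ((PySem.List.sorted_eq_nil_iff [] (fun x => x) false).mpr rfl)
        rw [hcase] at this
        exact List.cons_ne_nil _ _ this
      simpa [List.isEmpty_iff] using hne
    change PySem.List.max? ((segLoop t [] h h).filter (okSeg maze y min_len)) (fun p => p.2 - p.1)
      = if S.isEmpty = true then none
        else bLoop maze S y min_len (PySem.List.sorted S (fun x => x) false) none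
    rw [hSne]
    simp only [Bool.false_eq_true, if_false]
    have hls : PySem.List.sorted S (fun x => x) false = h :: t := hl.symm.trans hcase
    rw [hls, hstep, hloop, segLoop_eq, List.nil_append, runsFrom_cons, max?_eq_foldl_updBest, hE]
    by_cases hok : okSeg maze y min_len (h, E) = true
    · rw [if_pos hok, List.filter_cons_of_pos hok, List.foldl_cons]
    · rw [if_neg hok, List.filter_cons_of_neg (by simp [hok])]
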